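-- pv_equiv track=rewrite | github.com/avirupdandapat/ALGOPROJECT | waytocolour3xnboard.py | solve
-- ===== SOURCE A (Python) =====
-- def solve(A):
--     c3 = 24
--     c2 = 12
--     temp = 0
--     for i in range(2, A + 1):
--         temp = c3
--         c3 = (11 * c3 + 10 * c2) % 1000000007
--         c2 = (5 * temp + 7 * c2) % 1000000007
--
--     return (c3 + c2) % 1000000007
-- ===== SOURCE B (Python) =====
-- M = 1000000007
--
-- def _mmul(X, Y):
--     a, b, c, d = X
--     e, f, g, h = Y
--     return ((a * e + b * g) % M, (a * f + b * h) % M,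
--             (c * e + d * g) % M, (c * f + d * h) % M)
--
-- def _mpow(X, n):
--     # binary exponentiation: X^n mod M, n >= 0
--     R = (1, 0, 0, 1)
--     while n > 0:
--         if n % 2 == 1:
--             R = _mmul(R, X)
--         X = _mmul(X, X)
--         n //= 2
--     return R
--
-- def solve(A):
--     # (c3, c2) evolves linearly: [[11,10],[5,7]]^(A-1) applied to (24,12)
--     n = A - 1 if A >= 1 else 0
--     p0, p1, p2, p3 = _mpow((11, 10, 5, 7), n)
--     c3 = (p0 * 24 + p1 * 12) % M
--     c2 = (p2 * 24 + p3 * 12) % M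
--     return (c3 + c2) % M
-- ===== Notes on version B (the rewrite author's own statement) =====
-- stated objective: faster
-- what changed: Replaced the O(A) linear-recurrence loop by binary exponentiation of the 2x2 transition matrix [[11,10],[5,7]] modulo the prime, applied to the initial vector (24,12).
import Mathlib
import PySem

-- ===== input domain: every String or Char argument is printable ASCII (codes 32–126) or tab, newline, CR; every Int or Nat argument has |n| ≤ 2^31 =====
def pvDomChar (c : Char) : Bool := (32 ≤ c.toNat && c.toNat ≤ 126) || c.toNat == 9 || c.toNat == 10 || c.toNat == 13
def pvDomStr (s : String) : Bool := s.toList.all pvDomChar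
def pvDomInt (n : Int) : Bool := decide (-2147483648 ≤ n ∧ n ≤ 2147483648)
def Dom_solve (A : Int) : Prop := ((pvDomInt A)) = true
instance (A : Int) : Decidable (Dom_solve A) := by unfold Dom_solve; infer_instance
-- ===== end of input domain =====

-- B replaces A's O(A) loop by binary exponentiation of the 2x2 transition matrix modulo the prime (O(log A)).

-- ===== PORT A =====
-- literal port: for i in range(2, A+1): temp=c3; c3=(11*c3+10*c2)%M; c2=(5*temp+7*c2)%M
def solve (A : Int) : Int :=
  let s := (PySem.List.pyRange 2 (A + 1) 1).foldl
    (fun (st : Int × Int × Int) _ =>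
      let c3 := st.1; let c2 := st.2.1
      let temp := c3
      let c3' := PySem.Int.mod (11 * c3 + 10 * c2) 1000000007
      let c2' := PySem.Int.mod (5 * temp + 7 * c2) 1000000007
      (c3', c2', temp))
    (24, 12, 0)
  PySem.Int.mod (s.1 + s.2.1) 1000000007

-- ===== PORT B =====
-- B-side helpers (transliteration of Source B)
def bMmul (X Y : Int × Int × Int × Int) : Int × Int × Int × Int :=
  (PySem.Int.mod (X.1 * Y.1 + X.2.1 * Y.2.2.1) 1000000007,
   PySem.Int.mod (X.1 * Y.2.1 + X.2.1 * Y.2.2.2) 1000000007,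
   PySem.Int.mod (X.2.2.1 * Y.1 + X.2.2.2 * Y.2.2.1) 1000000007,
   PySem.Int.mod (X.2.2.1 * Y.2.1 + X.2.2.2 * Y.2.2.2) 1000000007)

-- while n > 0: if n odd R = R*X; X = X*X; n //= 2
def bMpow (X : Int × Int × Int × Int) (n : Nat) (R : Int × Int × Int × Int) :
    Int × Int × Int × Int :=
  if n = 0 then R
  else bMpow (bMmul X X) (n / 2) (if n % 2 = 1 then bMmul R X else R)
decreasing_by exact Nat.div_lt_self (Nat.pos_of_ne_zero (by assumption)) (by omega)

def solve_alt (A : Int) : Int :=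
  let n : Nat := if A ≥ 1 then (A - 1).toNat else 0
  let P := bMpow (11, 10, 5, 7) n (1, 0, 0, 1)
  let c3 := PySem.Int.mod (P.1 * 24 + P.2.1 * 12) 1000000007
  let c2 := PySem.Int.mod (P.2.2.1 * 24 + P.2.2.2 * 12) 1000000007
  PySem.Int.mod (c3 + c2) 1000000007

-- ===== PRECONDITION & SPEC =====
def Spec_solve (A : Int) (out : Int) : Prop := out = solve_alt A
instance (A : Int) (out : Int) : Decidable (Spec_solve A out) := by unfold Spec_solve; infer_instance

-- ===== CLAIM (what is proved, stated in full; the proofs are below) =====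
def Claim_equal_solve : Prop := ∀ (A : Int), Dom_solve A → Spec_solve A (solve A)

-- ===== LEMMAS AND PROOFS =====

-- bridge: Python % with the positive modulus is Int.emod
theorem pvPm (a : Int) : PySem.Int.mod a 1000000007 = a % 1000000007 :=
  PySem.Int.mod_eq_emod_of_pos (by norm_num)

-- scalar congruences for a 2-term dot product mod 1000000007
theorem pvLmodL (a b e g : Int) :
    ((a % 1000000007) * e + (b % 1000000007) * g) % 1000000007
      = (a * e + b * g) % 1000000007 := by
  have h : Int.ModEq 1000000007 ((a % 1000000007) * e + (b % 1000000007) * g) (a * e + b * g) :=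
    Int.ModEq.add (Int.ModEq.mul_right e (Int.emod_emod_of_dvd a dvd_rfl))
      (Int.ModEq.mul_right g (Int.emod_emod_of_dvd b dvd_rfl))
  simpa [Int.ModEq] using h

theorem pvLmodR (a b e g : Int) :
    (a * (e % 1000000007) + b * (g % 1000000007)) % 1000000007
      = (a * e + b * g) % 1000000007 := by
  have h : Int.ModEq 1000000007 (a * (e % 1000000007) + b * (g % 1000000007)) (a * e + b * g) :=
    Int.ModEq.add (Int.ModEq.mul_left a (Int.emod_emod_of_dvd e dvd_rfl))
      (Int.ModEq.mul_left b (Int.emod_emod_of_dvd g dvd_rfl))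
  simpa [Int.ModEq] using h

-- unreduced 2x2 product and entrywise reduction
def pvUmul (X Y : Int × Int × Int × Int) : Int × Int × Int × Int :=
  (X.1 * Y.1 + X.2.1 * Y.2.2.1, X.1 * Y.2.1 + X.2.1 * Y.2.2.2,
   X.2.2.1 * Y.1 + X.2.2.2 * Y.2.2.1, X.2.2.1 * Y.2.1 + X.2.2.2 * Y.2.2.2)

def pvRed (X : Int × Int × Int × Int) : Int × Int × Int × Int :=
  (X.1 % 1000000007, X.2.1 % 1000000007, X.2.2.1 % 1000000007, X.2.2.2 % 1000000007)

theorem pvMmul_eq (X Y : Int × Int × Int × Int) : bMmul X Y = pvRed (pvUmul X Y) := by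
  simp [bMmul, pvUmul, pvRed]

theorem pvRed_red (X : Int × Int × Int × Int) : pvRed (pvRed X) = pvRed X := by
  simp [pvRed, Int.emod_emod_of_dvd _ (dvd_refl (1000000007 : Int))]

theorem pvRed_mmul (X Y : Int × Int × Int × Int) : pvRed (bMmul X Y) = bMmul X Y := by
  rw [pvMmul_eq, pvRed_red]

theorem pvRed_umul_left (X Y : Int × Int × Int × Int) :
    pvRed (pvUmul (pvRed X) Y) = pvRed (pvUmul X Y) := by
  simp [pvRed, pvUmul, pvLmodL]

theorem pvRed_umul_right (X Y : Int × Int × Int × Int) :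
    pvRed (pvUmul X (pvRed Y)) = pvRed (pvUmul X Y) := by
  simp [pvRed, pvUmul, pvLmodR]

theorem pvUmul_assoc (X Y Z : Int × Int × Int × Int) :
    pvUmul (pvUmul X Y) Z = pvUmul X (pvUmul Y Z) := by
  simp only [pvUmul, Prod.mk.injEq]
  refine ⟨by ring, by ring, by ring, by ring⟩

theorem pvMmul_assoc (X Y Z : Int × Int × Int × Int) :
    bMmul (bMmul X Y) Z = bMmul X (bMmul Y Z) := by
  rw [pvMmul_eq X Y, pvMmul_eq _ Z, pvRed_umul_left, pvMmul_eq Y Z, pvMmul_eq X _,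
    pvRed_umul_right, pvUmul_assoc]

theorem pvUmul_id_right (X : Int × Int × Int × Int) : pvUmul X (1, 0, 0, 1) = X := by
  simp [pvUmul]

theorem pvUmul_id_left (X : Int × Int × Int × Int) : pvUmul (1, 0, 0, 1) X = X := by
  simp [pvUmul]

theorem pvMmul_id_right (X : Int × Int × Int × Int) (h : pvRed X = X) :
    bMmul X (1, 0, 0, 1) = X := by
  rw [pvMmul_eq, pvUmul_id_right, h]

theorem pvMmul_id_left (X : Int × Int × Int × Int) (h : pvRed X = X) :
    bMmul (1, 0, 0, 1) X = X := by
  rw [pvMmul_eq, pvUmul_id_left, h]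

-- iterated (right-appended) power
def pvNpow (X : Int × Int × Int × Int) : Nat → Int × Int × Int × Int
  | 0 => (1, 0, 0, 1)
  | n + 1 => bMmul (pvNpow X n) X

theorem pvNpow_reduced (X : Int × Int × Int × Int) (n : Nat) :
    pvRed (pvNpow X n) = pvNpow X n := by
  cases n with
  | zero => simp [pvNpow, pvRed]
  | succ m => simp [pvNpow, pvRed_mmul]

theorem pvMmul_npow_comm (X : Int × Int × Int × Int) (h : pvRed X = X) (n : Nat) :
    bMmul X (pvNpow X n) = bMmul (pvNpow X n) X := by
  induction n with
  | zero => rw [pvNpow, pvMmul_id_right X h, pvMmul_id_left X h]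
  | succ m ih => rw [pvNpow, ← pvMmul_assoc, ih]

theorem pvNpow_sq (X : Int × Int × Int × Int) (k : Nat) :
    pvNpow (bMmul X X) k = pvNpow X (2 * k) := by
  induction k with
  | zero => rfl
  | succ m ih =>
    have h2 : 2 * (m + 1) = 2 * m + 1 + 1 := by ring
    rw [pvNpow, ih, h2, pvNpow, pvNpow, pvMmul_assoc]

theorem pvMpow_eq (n : Nat) : ∀ (X R : Int × Int × Int × Int),
    pvRed X = X → pvRed R = R → bMpow X n R = bMmul R (pvNpow X n) := by
  induction n using Nat.strong_induction_on with
  | _ n ih =>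
    intro X R hX hR
    rw [bMpow]
    by_cases hn : n = 0
    · subst hn
      simp only [if_true]
      show R = bMmul R (1, 0, 0, 1)
      rw [pvMmul_id_right R hR]
    · rw [if_neg hn]
      have hdiv : n / 2 < n := Nat.div_lt_self (Nat.pos_of_ne_zero hn) (by omega)
      by_cases hodd : n % 2 = 1
      · rw [if_pos hodd,
          ih (n / 2) hdiv (bMmul X X) (bMmul R X) (pvRed_mmul X X) (pvRed_mmul R X),
          pvNpow_sq, pvMmul_assoc, pvMmul_npow_comm X hX]
        have hm : 2 * (n / 2) + 1 = n := by omega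
        rw [show bMmul (pvNpow X (2 * (n / 2))) X = pvNpow X (2 * (n / 2) + 1) from rfl, hm]
      · rw [if_neg hodd,
          ih (n / 2) hdiv (bMmul X X) R (pvRed_mmul X X) hR, pvNpow_sq]
        have hm : 2 * (n / 2) = n := by omega
        rw [hm]

-- vector action of a matrix, reduced mod 1000000007
def pvApp (P : Int × Int × Int × Int) (v : Int × Int) : Int × Int :=
  ((P.1 * v.1 + P.2.1 * v.2) % 1000000007,
   (P.2.2.1 * v.1 + P.2.2.2 * v.2) % 1000000007)

theorem pvApp_mmul (X Y : Int × Int × Int × Int) (v : Int × Int) :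
    pvApp (bMmul X Y) v = pvApp X (pvApp Y v) := by
  rw [pvMmul_eq]
  simp only [pvApp, pvRed, pvUmul, pvLmodL, pvLmodR, Prod.mk.injEq]
  constructor <;> · congr 1; ring

-- A's loop, abstracted: one step of the recurrence on (c3, c2)
def pvStep (v : Int × Int) : Int × Int :=
  ((11 * v.1 + 10 * v.2) % 1000000007, (5 * v.1 + 7 * v.2) % 1000000007)

def pvIterP : Nat → (Int × Int) → Int × Int
  | 0, v => v
  | n + 1, v => pvIterP n (pvStep v)

theorem pvStep_app (v : Int × Int) : pvStep v = pvApp (11, 10, 5, 7) v := rfl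

def pvRed2 (v : Int × Int) : Int × Int := (v.1 % 1000000007, v.2 % 1000000007)

theorem pvStep_reduced (v : Int × Int) : pvRed2 (pvStep v) = pvStep v := by
  simp [pvStep, pvRed2, Int.emod_emod_of_dvd _ (dvd_refl (1000000007 : Int))]

theorem pvApp_npow (n : Nat) : ∀ (v : Int × Int), pvRed2 v = v →
    pvApp (pvNpow (11, 10, 5, 7) n) v = pvIterP n v := by
  induction n with
  | zero =>
    intro v hv
    simpa [pvNpow, pvApp, pvIterP, pvRed2] using congrArg id hv
  | succ m ih =>
    intro v hv
    rw [pvNpow, pvApp_mmul, ← pvStep_app, pvIterP, ih (pvStep v) (pvStep_reduced v)]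

-- A's fold (the element is ignored) is an iterate of the triple step
def pvStepT (st : Int × Int × Int) : Int × Int × Int :=
  ((11 * st.1 + 10 * st.2.1) % 1000000007, (5 * st.1 + 7 * st.2.1) % 1000000007, st.1)

def pvIterT : Nat → (Int × Int × Int) → Int × Int × Int
  | 0, st => st
  | n + 1, st => pvIterT n (pvStepT st)

theorem pvFoldA (l : List Int) : ∀ (st : Int × Int × Int),
    l.foldl (fun (st : Int × Int × Int) _ =>
      ((11 * st.1 + 10 * st.2.1) % 1000000007,
       (5 * st.1 + 7 * st.2.1) % 1000000007, st.1)) st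
      = pvIterT l.length st := by
  induction l with
  | nil => intro st; rfl
  | cons x xs ih =>
    intro st
    simp only [List.foldl_cons, List.length_cons, pvIterT, pvStepT]
    exact ih _

theorem pvIterT_proj (n : Nat) : ∀ (st : Int × Int × Int),
    ((pvIterT n st).1, (pvIterT n st).2.1) = pvIterP n (st.1, st.2.1) := by
  induction n with
  | zero => intro st; rfl
  | succ m ih =>
    intro st
    rw [pvIterT, pvIterP, ih (pvStepT st)]
    rfl

theorem pvS_reduced : pvRed ((11 : Int), (10 : Int), (5 : Int), (7 : Int))
    = ((11 : Int), (10 : Int), (5 : Int), (7 : Int)) := by decide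

-- ===== VERDICT (by name: the statement is the Claim_ definition above) =====
theorem solve_spec : Claim_equal_solve := by
  intro A _
  unfold Spec_solve
  have hn : (if A ≥ 1 then (A - 1).toNat else 0) = (A - 1).toNat := by split <;> omega
  simp only [solve, solve_alt, hn, pvPm]
  rw [pvFoldA, PySem.List.length_pyRange_one]
  have hlen : (A + 1 - 2).toNat = (A - 1).toNat := by omega
  rw [hlen]
  have hP : bMpow (11, 10, 5, 7) (A - 1).toNat (1, 0, 0, 1)
      = pvNpow (11, 10, 5, 7) (A - 1).toNat := by
    rw [pvMpow_eq _ _ _ pvS_reduced (by decide),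
      pvMmul_id_left _ (pvNpow_reduced _ _)]
  rw [hP]
  have happ := pvApp_npow (A - 1).toNat ((24 : Int), (12 : Int)) (by decide)
  simp only [pvApp] at happ
  have h1 : ((pvNpow (11, 10, 5, 7) (A - 1).toNat).1 * 24
        + (pvNpow (11, 10, 5, 7) (A - 1).toNat).2.1 * 12) % 1000000007
      = (pvIterP (A - 1).toNat (24, 12)).1 := congrArg Prod.fst happ
  have h2 : ((pvNpow (11, 10, 5, 7) (A - 1).toNat).2.2.1 * 24
        + (pvNpow (11, 10, 5, 7) (A - 1).toNat).2.2.2 * 12) % 1000000007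
      = (pvIterP (A - 1).toNat (24, 12)).2 := congrArg Prod.snd happ
  have hproj := pvIterT_proj (A - 1).toNat ((24 : Int), (12 : Int), (0 : Int))
  have g1 : (pvIterT (A - 1).toNat (24, 12, 0)).1
      = (pvIterP (A - 1).toNat (24, 12)).1 := congrArg Prod.fst hproj
  have g2 : (pvIterT (A - 1).toNat (24, 12, 0)).2.1
      = (pvIterP (A - 1).toNat (24, 12)).2 := congrArg Prod.snd hproj
  rw [h1, h2, g1, g2]
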